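-- pv_equiv track=rewrite | github.com/Lo808/Graph-SSL | wl_gcl/src/trainers/train_wl_dino.py | _parse_wl_cls_levels
-- ===== SOURCE A (Python) =====
-- from typing import Dict, List, Sequence, Tuple
--
-- def _parse_wl_cls_levels(level_spec: str, wl_depth: int) -> List[int]:
--     """
--     Parse WL classification levels from config.
--     Accepted forms:
--       - "all" -> [1, 2, ..., wl_depth]
--       - comma-separated integers, e.g. "1,2,4"
--     """
--     if wl_depth <= 0:
--         return []
--     raw = (level_spec or "all").strip().lower()
--     if raw == "all":
--         return list(range(1, wl_depth + 1))
--
--     out: List[int] = []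
--     seen = set()
--     for tok in raw.split(","):
--         tok = tok.strip()
--         if not tok:
--             continue
--         try:
--             t = int(tok)
--         except ValueError:
--             continue
--         if 1 <= t <= wl_depth and t not in seen:
--             seen.add(t)
--             out.append(t)
--     out.sort()
--     return out
-- ===== SOURCE B (Python) =====
-- def _parse_wl_cls_levels(level_spec, wl_depth):
--     if wl_depth <= 0:
--         return []
--     raw = (level_spec or "all").strip().lower()
--     if raw == "all":
--         return list(range(1, wl_depth + 1))
--     # stage 1: collect every parseable token value, no bounds / dedup logic
--     vals = set()
--     for tok in raw.split(","):
--         tok = tok.strip()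
--         if not tok:
--             continue
--         try:
--             vals.add(int(tok))
--         except ValueError:
--             pass
--     # stage 2: drain the set in ascending order, keeping only in-range levels
--     out = []
--     while vals:
--         m = min(vals)
--         vals.remove(m)
--         if 1 <= m <= wl_depth:
--             out.append(m)
--     return out
-- ===== Notes on version B (the rewrite author's own statement) =====
-- stated objective: alternative
-- what changed: B splits the work into two staged passes: first collect all parsed token values into a set with no bounds or duplicate bookkeeping, then drain the set by repeated min-extraction, filtering to 1..wl_depth on the way out, which removes A's 'seen' set, the append list and the final sort call.
import Mathlib
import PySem

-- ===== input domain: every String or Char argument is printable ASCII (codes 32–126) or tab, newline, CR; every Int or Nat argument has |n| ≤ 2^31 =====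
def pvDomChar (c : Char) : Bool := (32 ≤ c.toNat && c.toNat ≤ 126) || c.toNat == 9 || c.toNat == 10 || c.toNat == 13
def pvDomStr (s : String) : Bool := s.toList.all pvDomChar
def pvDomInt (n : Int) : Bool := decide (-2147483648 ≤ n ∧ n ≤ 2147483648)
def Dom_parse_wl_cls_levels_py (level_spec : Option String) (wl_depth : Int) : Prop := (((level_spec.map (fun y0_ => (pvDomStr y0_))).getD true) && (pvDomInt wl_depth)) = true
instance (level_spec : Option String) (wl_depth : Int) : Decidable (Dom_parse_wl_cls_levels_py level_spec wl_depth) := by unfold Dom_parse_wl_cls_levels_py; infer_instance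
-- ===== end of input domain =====

-- B stages the work differently: pass 1 collects every parsed token value into a set (no bounds or dedup bookkeeping), pass 2 drains the set by repeated min-extraction filtering to 1..wl_depth — no 'seen' set, no append list, no sort call (alternative decomposition; same return value).

-- ===== PORT A =====
-- the body of A's token loop: skip blanks, skip unparsable tokens, append fresh in-range values and record them in 'seen'
def pvStepA (wl_depth : Int) (st : List Int × PySem.Set Int) (tok : String) : List Int × PySem.Set Int :=
  let tok := PySem.Str.strip tok
  if tok = "" then st
  else match PySem.Int.ofStr? tok with
    | none => st            -- int(tok) raised ValueError: continue
    | some t =>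
      if 1 ≤ t ∧ t ≤ wl_depth ∧ ¬ t ∈ st.2 then
        (st.1 ++ [t], PySem.Set.add st.2 t)
      else st

def parse_wl_cls_levels_py (level_spec : Option String) (wl_depth : Int) : List Int :=
  if wl_depth ≤ 0 then []
  else
    let base := match level_spec with
      | none => "all"
      | some s => if s = "" then "all" else s   -- 'level_spec or "all"': falsy = None or ""
    let raw := PySem.Str.lower (PySem.Str.strip base)
    if raw = "all" then PySem.List.pyRange 1 (wl_depth + 1) 1
    else
      let st := ((PySem.Str.split? raw ",").getD []).foldl (pvStepA wl_depth) ([], PySem.Set.empty)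
      PySem.List.sorted st.1 (fun x => x) false

-- ===== PORT B =====
-- pass 1 of Source B: every token that survives strip/int() lands in the set, unconditionally
def pvCollect (vals : PySem.Set Int) (tok : String) : PySem.Set Int :=
  let tok := PySem.Str.strip tok
  if tok = "" then vals
  else match PySem.Int.ofStr? tok with
    | none => vals           -- int(tok) raised ValueError: pass
    | some t => PySem.Set.add vals t

-- termination facts for the drain loop: removing min(vals) shrinks the set
theorem pvDiscard_lt (vals : PySem.Set Int) (m : Int) (hmem : m ∈ vals) :
    (PySem.Set.discard vals m).length < vals.length := by
  simp only [PySem.Set.discard]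
  exact List.length_filter_lt_length_iff_exists.mpr ⟨m, hmem, by simp⟩

theorem pvRemove_lt (vals : PySem.Set Int) (m : Int)
    (hm : PySem.List.min? vals (fun x => x) = some m) :
    ((PySem.Set.remove? vals m).getD []).length < vals.length := by
  have hmem : m ∈ vals := PySem.List.min?_mem hm
  rw [PySem.Set.remove?_of_mem hmem]
  exact pvDiscard_lt vals m hmem

-- pass 2 of Source B: 'while vals: m = min(vals); vals.remove(m); if 1 <= m <= wl_depth: out.append(m)'
def pvDrain (wl_depth : Int) (vals : PySem.Set Int) : List Int :=
  match hm : PySem.List.min? vals (fun x => x) with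
  | none => []               -- vals is empty: the while loop ends
  | some m =>
    let rest := (PySem.Set.remove? vals m).getD []
    if 1 ≤ m ∧ m ≤ wl_depth then m :: pvDrain wl_depth rest
    else pvDrain wl_depth rest
termination_by vals.length
decreasing_by all_goals exact pvRemove_lt vals m hm

def parse_wl_cls_levels_py_alt (level_spec : Option String) (wl_depth : Int) : List Int :=
  if wl_depth ≤ 0 then []
  else
    let base := match level_spec with
      | none => "all"
      | some s => if s = "" then "all" else s
    let raw := PySem.Str.lower (PySem.Str.strip base)
    if raw = "all" then PySem.List.pyRange 1 (wl_depth + 1) 1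
    else
      pvDrain wl_depth (((PySem.Str.split? raw ",").getD []).foldl pvCollect PySem.Set.empty)

-- ===== PRECONDITION & SPEC =====
def Spec_parse_wl_cls_levels_py (level_spec : Option String) (wl_depth : Int) (out : List Int) : Prop := out = parse_wl_cls_levels_py_alt level_spec wl_depth
instance (level_spec : Option String) (wl_depth : Int) (out : List Int) : Decidable (Spec_parse_wl_cls_levels_py level_spec wl_depth out) := by unfold Spec_parse_wl_cls_levels_py; infer_instance

-- ===== CLAIM (what is proved, stated in full; the proofs are below) =====
def Claim_equal_parse_wl_cls_levels_py : Prop := ∀ (level_spec : Option String) (wl_depth : Int), Dom_parse_wl_cls_levels_py level_spec wl_depth → Spec_parse_wl_cls_levels_py level_spec wl_depth (parse_wl_cls_levels_py level_spec wl_depth)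

-- ===== LEMMAS AND PROOFS =====

theorem pvDrain_nil (wl_depth : Int) : pvDrain wl_depth [] = [] := by
  rw [pvDrain.eq_def]; simp [PySem.List.min?]

theorem pvDrain_eq (wl_depth : Int) (vals : PySem.Set Int) (m : Int)
    (hm : PySem.List.min? vals (fun x => x) = some m) :
    pvDrain wl_depth vals =
      if 1 ≤ m ∧ m ≤ wl_depth then m :: pvDrain wl_depth (PySem.Set.discard vals m)
      else pvDrain wl_depth (PySem.Set.discard vals m) := by
  rw [pvDrain.eq_def]
  split
  · next heq => rw [heq] at hm; cases hm
  · next m' heq =>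
    rw [heq] at hm; cases hm
    rw [PySem.Set.remove?_of_mem (PySem.List.min?_mem heq)]
    rfl

theorem pvDrain_mem (wl_depth x : Int) (vals : PySem.Set Int) :
    x ∈ pvDrain wl_depth vals ↔ x ∈ vals ∧ 1 ≤ x ∧ x ≤ wl_depth := by
  induction hn : vals.length using Nat.strong_induction_on generalizing vals with
  | _ n ih =>
    cases hm : PySem.List.min? vals (fun y => y) with
    | none =>
      have hv : vals = [] := (PySem.List.min?_eq_none_iff _ _).mp hm
      subst hv; rw [pvDrain_nil]; simp
    | some m =>
      have hmem : m ∈ vals := PySem.List.min?_mem hm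
      have hlt : (PySem.Set.discard vals m).length < n := hn ▸ pvDiscard_lt vals m hmem
      have ihd := ih _ hlt (PySem.Set.discard vals m) rfl
      rw [pvDrain_eq wl_depth vals m hm]
      by_cases hc : 1 ≤ m ∧ m ≤ wl_depth
      · simp only [if_pos hc, List.mem_cons, ihd, PySem.Set.mem_discard]
        constructor
        · rintro (hxm | ⟨⟨hx, _⟩, hb⟩)
          · exact hxm ▸ ⟨hmem, hc⟩
          · exact ⟨hx, hb⟩
        · rintro ⟨hx, hb⟩
          by_cases hxm : x = m
          · exact Or.inl hxm
          · exact Or.inr ⟨⟨hx, hxm⟩, hb⟩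
      · simp only [if_neg hc, ihd, PySem.Set.mem_discard]
        constructor
        · rintro ⟨⟨hx, _⟩, hb⟩; exact ⟨hx, hb⟩
        · rintro ⟨hx, hb⟩
          refine ⟨⟨hx, fun hxm => ?_⟩, hb⟩
          subst hxm; exact hc hb

theorem pvDrain_pairwise (wl_depth : Int) (vals : PySem.Set Int) :
    (pvDrain wl_depth vals).Pairwise (· < ·) := by
  induction hn : vals.length using Nat.strong_induction_on generalizing vals with
  | _ n ih =>
    cases hm : PySem.List.min? vals (fun y => y) with
    | none =>
      have hv : vals = [] := (PySem.List.min?_eq_none_iff _ _).mp hm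
      subst hv; rw [pvDrain_nil]; simp
    | some m =>
      have hmem : m ∈ vals := PySem.List.min?_mem hm
      have hlt : (PySem.Set.discard vals m).length < n := hn ▸ pvDiscard_lt vals m hmem
      have ihd := ih _ hlt (PySem.Set.discard vals m) rfl
      rw [pvDrain_eq wl_depth vals m hm]
      by_cases hc : 1 ≤ m ∧ m ≤ wl_depth
      · simp only [if_pos hc, List.pairwise_cons]
        refine ⟨fun y hy => ?_, ihd⟩
        have hyd : y ∈ PySem.Set.discard vals m ∧ 1 ≤ y ∧ y ≤ wl_depth :=
          (pvDrain_mem wl_depth y _).mp hy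
        obtain ⟨hyv, hyne⟩ := (PySem.Set.mem_discard vals m y).mp hyd.1
        have := PySem.List.min?_isMin hm y hyv
        omega
      · simpa only [if_neg hc] using ihd

-- joint loop invariant: A's seen-set tracks its out-list, A's out-list is duplicate-free,
-- and membership in A's out-list is exactly membership-in-B's-set-and-in-range
def pvInv (wl_depth : Int) (st : List Int × PySem.Set Int) (vs : PySem.Set Int) : Prop :=
  (∀ x : Int, x ∈ st.2 ↔ x ∈ st.1) ∧ st.1.Nodup ∧
  (∀ x : Int, x ∈ st.1 ↔ x ∈ vs ∧ 1 ≤ x ∧ x ≤ wl_depth)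

theorem pv_step_inv (wl_depth : Int) (tok : String)
    (st : List Int × PySem.Set Int) (vs : PySem.Set Int) (h : pvInv wl_depth st vs) :
    pvInv wl_depth (pvStepA wl_depth st tok) (pvCollect vs tok) := by
  obtain ⟨hseen, hnd, hmem⟩ := h
  unfold pvStepA pvCollect
  by_cases he : PySem.Str.strip tok = ""
  · simp only [he]; exact ⟨hseen, hnd, hmem⟩
  · simp only [if_neg he]
    cases hp : PySem.Int.ofStr? (PySem.Str.strip tok) with
    | none => exact ⟨hseen, hnd, hmem⟩
    | some t =>
      dsimp only
      split_ifs with hA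
      · -- A appends the fresh in-range t; B adds it to the set
        refine ⟨?_, ?_, ?_⟩
        · intro x
          rw [PySem.Set.mem_add]
          simp only [List.mem_append, List.mem_singleton, hseen x]
        · refine List.nodup_append.mpr ⟨hnd, List.nodup_singleton t, fun x hx y hy hxy => ?_⟩
          simp only [List.mem_singleton] at hy
          exact hA.2.2 ((hseen t).mpr (by rwa [hxy, hy] at hx))
        · intro x
          rw [PySem.Set.mem_add]
          simp only [List.mem_append, List.mem_singleton, hmem x]
          constructor
          · rintro (⟨hv, hb⟩ | hxt)
            · exact ⟨Or.inl hv, hb⟩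
            · exact ⟨Or.inr hxt, hxt ▸ ⟨hA.1, hA.2.1⟩⟩
          · rintro ⟨hv | hxt, hb⟩
            · exact Or.inl ⟨hv, hb⟩
            · exact Or.inr hxt
      · -- A skips t (out of range, or already seen); B's set-add changes no membership that matters
        refine ⟨hseen, hnd, ?_⟩
        intro x
        rw [hmem x, PySem.Set.mem_add]
        constructor
        · rintro ⟨hv, hb⟩; exact ⟨Or.inl hv, hb⟩
        · rintro ⟨hv | hxt, hb⟩
          · exact ⟨hv, hb⟩
          · -- t is in range here, so A skipped it because it was already seen, hence t ∈ vs
            subst hxt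
            have ht : x ∈ st.1 := by
              by_contra hc
              exact hA ⟨hb.1, hb.2, fun hs => hc ((hseen x).mp hs)⟩
            exact ⟨((hmem x).mp ht).1, hb⟩

theorem pv_fold_inv (wl_depth : Int) (toks : List String)
    (st : List Int × PySem.Set Int) (vs : PySem.Set Int) (h : pvInv wl_depth st vs) :
    pvInv wl_depth (toks.foldl (pvStepA wl_depth) st) (toks.foldl pvCollect vs) := by
  induction toks generalizing st vs with
  | nil => exact h
  | cons tok toks ih =>
    simp only [List.foldl_cons]
    exact ih _ _ (pv_step_inv wl_depth tok st vs h)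

-- ===== VERDICT (by name: the statement is the Claim_ definition above) =====
theorem parse_wl_cls_levels_py_spec : Claim_equal_parse_wl_cls_levels_py := by
  intro level_spec wl_depth _
  unfold Spec_parse_wl_cls_levels_py parse_wl_cls_levels_py parse_wl_cls_levels_py_alt
  by_cases h0 : wl_depth ≤ 0
  · simp [h0]
  · simp only [if_neg h0]
    set base := (match level_spec with
      | none => "all"
      | some s => if s = "" then "all" else s) with hbase
    set raw := PySem.Str.lower (PySem.Str.strip base) with hraw
    by_cases hall : raw = "all"
    · simp [hall]
    · simp only [if_neg hall]
      obtain ⟨_, hnd, hmem⟩ := pv_fold_inv wl_depth ((PySem.Str.split? raw ",").getD [])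
        ([], PySem.Set.empty) PySem.Set.empty
        (by refine ⟨?_, ?_, ?_⟩ <;> simp [PySem.Set.empty])
      set st := ((PySem.Str.split? raw ",").getD []).foldl (pvStepA wl_depth) ([], PySem.Set.empty)
      set vs := ((PySem.Str.split? raw ",").getD []).foldl pvCollect PySem.Set.empty
      have hpw := pvDrain_pairwise wl_depth vs
      apply PySem.List.sorted_eq_of_perm_of_pairwise_lt
      · refine (List.perm_ext_iff_of_nodup (hpw.imp ne_of_lt) hnd).mpr ?_
        intro x
        rw [pvDrain_mem, hmem x]
      · exact hpw
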